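-- pv_equiv track=rewrite | github.com/brettpalmberg/snowmelt | snowmelt/__init__.py | getMaxExtent
-- ===== SOURCE A (Python) =====
-- from collections import namedtuple
--
-- Extent = namedtuple('Extent', 'xmin,ymin,xmax,ymax')  # Convert to a class?
--
-- def getMaxExtent(extents):
--     xmin = extents[0][1][0]
--     ymin = extents[0][1][1]
--     xmax = extents[0][1][2]
--     ymax = extents[0][1][3]
--     for ext in extents:
--         ecoords = ext[1]
--         xmin = min(xmin, ecoords[0])
--         ymin = min(ymin, ecoords[1])
--         xmax = max(xmax, ecoords[2])
--         ymax = max(ymax, ecoords[3])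
--     return Extent(xmin, ymin, xmax, ymax)
-- ===== SOURCE B (Python) =====
-- from collections import namedtuple
--
-- Extent = namedtuple('Extent', 'xmin,ymin,xmax,ymax')
--
-- def getMaxExtent(extents):
--     cols = list(zip(*(ext[1] for ext in extents)))
--     return Extent(min(cols[0]), min(cols[1]), max(cols[2]), max(cols[3]))
-- ===== Notes on version B (the rewrite author's own statement) =====
-- stated objective: idiomatic
-- what changed: Replaces the fused loop with four running min/max accumulators (seeded from the first extent) by a transpose (zip(*...)) into four coordinate columns followed by an independent min/max reduction of each column.
import Mathlib
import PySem

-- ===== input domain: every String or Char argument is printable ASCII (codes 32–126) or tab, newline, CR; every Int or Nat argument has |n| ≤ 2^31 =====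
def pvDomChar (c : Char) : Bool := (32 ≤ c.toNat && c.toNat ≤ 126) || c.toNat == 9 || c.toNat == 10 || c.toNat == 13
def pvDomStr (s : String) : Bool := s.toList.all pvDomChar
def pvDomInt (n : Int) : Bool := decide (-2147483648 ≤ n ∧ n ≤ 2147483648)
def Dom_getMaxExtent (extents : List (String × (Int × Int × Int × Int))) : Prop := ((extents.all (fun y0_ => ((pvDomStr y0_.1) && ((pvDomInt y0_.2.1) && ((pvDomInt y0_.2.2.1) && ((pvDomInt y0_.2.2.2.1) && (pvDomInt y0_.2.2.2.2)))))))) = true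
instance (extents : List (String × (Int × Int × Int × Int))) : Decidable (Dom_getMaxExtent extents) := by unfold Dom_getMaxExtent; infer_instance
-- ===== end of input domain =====

-- B replaces A's fused loop with four running accumulators by a transpose into four
-- coordinate columns reduced independently with min/max (idiomatic build-then-reduce).

-- ===== PORT A =====
def getMaxExtent (extents : List (String × (Int × Int × Int × Int))) : Int × Int × Int × Int :=
  match extents with
  | [] => (0, 0, 0, 0)   -- Python raises IndexError on extents[0]; excluded by Pre_
  | e :: _ =>
    extents.foldl
      (fun s ext =>
        (min s.1 ext.2.1, min s.2.1 ext.2.2.1, max s.2.2.1 ext.2.2.2.1, max s.2.2.2 ext.2.2.2.2))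
      (e.2.1, e.2.2.1, e.2.2.2.1, e.2.2.2.2)

-- ===== PORT B =====
def getMaxExtent_alt (extents : List (String × (Int × Int × Int × Int))) : Int × Int × Int × Int :=
  -- cols = list(zip(*(ext[1] for ext in extents))) : the four columns of the coordinate table
  let coords := extents.map (fun ext => ext.2)
  let c0 := coords.map (fun c => c.1)
  let c1 := coords.map (fun c => c.2.1)
  let c2 := coords.map (fun c => c.2.2.1)
  let c3 := coords.map (fun c => c.2.2.2)
  match PySem.List.min? c0 (fun x => x), PySem.List.min? c1 (fun x => x),
        PySem.List.max? c2 (fun x => x), PySem.List.max? c3 (fun x => x) with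
  | some a, some b, some c, some d => (a, b, c, d)
  | _, _, _, _ => (0, 0, 0, 0)   -- Python raises IndexError on cols[0]; excluded by Pre_

-- ===== PRECONDITION & SPEC =====
-- Both programs raise IndexError on the empty list; that is the only exception.
def Pre_getMaxExtent (extents : List (String × (Int × Int × Int × Int))) : Prop := extents ≠ []
instance (extents : List (String × (Int × Int × Int × Int))) : Decidable (Pre_getMaxExtent extents) := by unfold Pre_getMaxExtent; infer_instance
def pvWitness_getMaxExtent : (List (String × (Int × Int × Int × Int))) := [("a", (1, 2, 3, 4))]

def Spec_getMaxExtent (extents : List (String × (Int × Int × Int × Int))) (out : Int × Int × Int × Int) : Prop := out = getMaxExtent_alt extents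
instance (extents : List (String × (Int × Int × Int × Int))) (out : Int × Int × Int × Int) : Decidable (Spec_getMaxExtent extents out) := by unfold Spec_getMaxExtent; infer_instance

-- ===== CLAIM (what is proved, stated in full; the proofs are below) =====
def Claim_equal_getMaxExtent : Prop := ∀ (extents : List (String × (Int × Int × Int × Int))), Dom_getMaxExtent extents → Pre_getMaxExtent extents → Spec_getMaxExtent extents (getMaxExtent extents)

-- ===== LEMMAS AND PROOFS =====

-- the fused 4-accumulator fold is the tuple of the four per-column folds
theorem fold4_eq (l : List (String × (Int × Int × Int × Int))) (a b c d : Int) :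
    l.foldl
      (fun s ext =>
        (min s.1 ext.2.1, min s.2.1 ext.2.2.1, max s.2.2.1 ext.2.2.2.1, max s.2.2.2 ext.2.2.2.2))
      ((a, b, c, d) : Int × Int × Int × Int)
    = ((l.map (fun e => e.2.1)).foldl min a,
       (l.map (fun e => e.2.2.1)).foldl min b,
       (l.map (fun e => e.2.2.2.1)).foldl max c,
       (l.map (fun e => e.2.2.2.2)).foldl max d) := by
  induction l generalizing a b c d with
  | nil => rfl
  | cons x t ih => simp [List.foldl, ih]

-- ===== VERDICT (by name: the statement is the Claim_ definition above) =====
theorem getMaxExtent_spec : Claim_equal_getMaxExtent := by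
  intro extents _ hpre
  unfold Spec_getMaxExtent getMaxExtent getMaxExtent_alt
  match extents with
  | [] => exact absurd rfl hpre
  | e :: t =>
    simp only [List.map_cons, List.map_map, Function.comp_def,
      PySem.List.min?_id_cons, PySem.List.max?_id_cons,
      List.foldl_cons, min_self, max_self, fold4_eq]
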